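-- pv_equiv track=rewrite | github.com/524119574/LeetCodeSolution | _AffirmPhoneInterviewQuestion.py | findCoAppear
-- ===== SOURCE A (Python) =====
-- def findCoAppear(words):
--     mapping = {}
--     for word in words:
--         for c1 in word:
--             counts = mapping.get(c1, {})
--             for c2 in word:
--                 if (c1 != c2):
--                     counts[c2] = counts.get(c2, 0) + 1
--             mapping[c1] = counts
--     finalRes = {}
--     for ch, counts in mapping.items():
--         res = []
--         maxCount = max(counts.values())
--         for key, count in mapping[ch].items():
--             if (count == maxCount):
--                 res.append(key)
--         finalRes[ch] = res
--     return finalRes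
-- ===== SOURCE B (Python) =====
-- def findCoAppear(words):
--     # Per word: count char frequencies once, then add freq[a]*freq[b] once per
--     # distinct ordered pair (a, b), instead of walking all occurrence pairs.
--     mapping = {}
--     for word in words:
--         freq = {}
--         for c in word:
--             freq[c] = freq.get(c, 0) + 1
--         for a, fa in freq.items():
--             counts = mapping.get(a, {})
--             for b, fb in freq.items():
--                 if a != b:
--                     counts[b] = counts.get(b, 0) + fa * fb
--             mapping[a] = counts
--     return {ch: [k for k, c in counts.items() if c == max(counts.values())]
--             for ch, counts in mapping.items()}
-- ===== Notes on version B (the rewrite author's own statement) =====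
-- stated objective: alternative
-- what changed: Per word, B builds a character-frequency dict in one pass and adds freq[a]*freq[b] once per distinct ordered character pair, instead of A's walk over all occurrence pairs; the result dict is built as a comprehension over the counts.
import Mathlib
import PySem

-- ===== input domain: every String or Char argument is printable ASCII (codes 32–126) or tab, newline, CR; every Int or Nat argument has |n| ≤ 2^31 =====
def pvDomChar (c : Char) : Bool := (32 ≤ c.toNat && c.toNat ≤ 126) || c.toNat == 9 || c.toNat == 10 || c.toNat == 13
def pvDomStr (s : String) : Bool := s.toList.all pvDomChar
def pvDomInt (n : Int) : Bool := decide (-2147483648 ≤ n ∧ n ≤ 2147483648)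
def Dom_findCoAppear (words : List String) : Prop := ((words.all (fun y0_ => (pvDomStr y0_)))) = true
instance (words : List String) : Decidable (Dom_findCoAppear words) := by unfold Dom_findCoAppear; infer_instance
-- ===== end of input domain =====

-- B replaces A's per-word walk over all occurrence pairs by a per-word frequency
-- dict and one addition of freq[a]*freq[b] per distinct ordered pair (a different algorithm).

-- ===== PORT A =====
def findCoAppear (words : List String) : List (String × List String) :=
  let mapping : PySem.Dict String (PySem.Dict String Int) :=
    words.foldl (fun mapping word =>
      word.toList.foldl (fun mapping c1 =>
        let counts :=
          word.toList.foldl (fun counts c2 =>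
            if String.ofList [c1] ≠ String.ofList [c2] then
              counts.insert (String.ofList [c2]) (counts.getD (String.ofList [c2]) 0 + 1)
            else counts)
            (mapping.getD (String.ofList [c1]) PySem.Dict.empty)
        mapping.insert (String.ofList [c1]) counts) mapping) PySem.Dict.empty
  let finalRes : PySem.Dict String (List String) :=
    mapping.items.foldl (fun finalRes p =>
      -- max(counts.values()); Python raises ValueError on an empty counts dict:
      -- those inputs are excluded by Pre_findCoAppear, the .getD 0 default is never used there
      let maxCount := (PySem.List.max? p.2.values (fun v => v)).getD 0
      let res := p.2.items.foldl (fun res q => if q.2 == maxCount then res ++ [q.1] else res) []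
      finalRes.insert p.1 res) PySem.Dict.empty
  finalRes.items

-- ===== PORT B =====
def findCoAppear_alt (words : List String) : List (String × List String) :=
  let mapping : PySem.Dict String (PySem.Dict String Int) :=
    words.foldl (fun mapping word =>
      let freq : PySem.Dict String Int :=
        word.toList.foldl (fun f c =>
          f.insert (String.ofList [c]) (f.getD (String.ofList [c]) 0 + 1)) PySem.Dict.empty
      freq.items.foldl (fun mapping p =>
        let counts :=
          freq.items.foldl (fun counts q =>
            if p.1 ≠ q.1 then counts.insert q.1 (counts.getD q.1 0 + p.2 * q.2) else counts)
            (mapping.getD p.1 PySem.Dict.empty)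
        mapping.insert p.1 counts) mapping) PySem.Dict.empty
  -- final dict comprehension: keys of mapping are distinct, so it is a map over the items
  -- (max(counts.values()) raises on empty counts exactly as in A; excluded by Pre_findCoAppear)
  mapping.items.map (fun p =>
    (p.1, (p.2.items.filter
            (fun q => q.2 == (PySem.List.max? p.2.values (fun v => v)).getD 0)).map (·.1)))

-- ===== PRECONDITION & SPEC =====
-- Pre_ excludes exactly the inputs where some character occurs only in words in which it is
-- the sole distinct character: there its co-occurrence dict is empty and BOTH Pythons raise
-- ValueError (max() of an empty sequence).  (The Lean ports are total and the proved equality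
-- in fact holds for all inputs.)
def Pre_findCoAppear (words : List String) : Prop :=
  (words.all (fun w => w.toList.all (fun c =>
    words.any (fun w' => w'.toList.contains c && w'.toList.any (fun c' => c' != c))))) = true
instance (words : List String) : Decidable (Pre_findCoAppear words) := by
  unfold Pre_findCoAppear; infer_instance
def pvWitness_findCoAppear : List String := ["ab", "ba"]
def Spec_findCoAppear (words : List String) (out : List (String × List String)) : Prop := out = findCoAppear_alt words
instance (words : List String) (out : List (String × List String)) : Decidable (Spec_findCoAppear words out) := by unfold Spec_findCoAppear; infer_instance

-- ===== CLAIM (what is proved, stated in full; the proofs are below) =====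
def Claim_equal_findCoAppear : Prop := ∀ (words : List String), Dom_findCoAppear words → Pre_findCoAppear words → Spec_findCoAppear words (findCoAppear words)

-- ===== LEMMAS AND PROOFS =====

-- abbreviations for the two dict types
abbrev pvSD := PySem.Dict String Int
abbrev pvMD := PySem.Dict String (PySem.Dict String Int)

-- the word as a list of one-character strings (what the Python loops iterate over)
def pvLetters (s : String) : List String := s.toList.map (fun c => String.ofList [c])

-- A's inner loop over one word, for a fixed character a
def pvInnerA (w : List String) (a : String) (v : pvSD) : pvSD :=
  w.foldl (fun v b => if a ≠ b then v.insert b (v.getD b 0 + 1) else v) v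

-- A's processing of one word
def pvStepA (m : pvMD) (w : List String) : pvMD :=
  w.foldl (fun m a => m.insert a (pvInnerA w a (m.getD a PySem.Dict.empty))) m

-- B's inner loop over the distinct characters of one word, for a fixed character a
def pvInnerB (w : List String) (a : String) (v : pvSD) : pvSD :=
  (PySem.Set.ofList w).foldl
    (fun v b => if a ≠ b then v.insert b (v.getD b 0 + (w.count a : Int) * (w.count b : Int)) else v) v

-- B's processing of one word
def pvStepB (m : pvMD) (w : List String) : pvMD :=
  (PySem.Set.ofList w).foldl (fun m a => m.insert a (pvInnerB w a (m.getD a PySem.Dict.empty))) m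

-- invariant: outer keys and all stored inner dicts have Nodup keys
def pvI (m : pvMD) : Prop :=
  m.keys.Nodup ∧ ∀ a, (m.getD a PySem.Dict.empty).keys.Nodup

-- ---- generic Set lemmas ----
theorem pvSet_update_of_subset {α : Type} [BEq α] [LawfulBEq α] (l : List α) :
    ∀ s : PySem.Set α, (∀ x ∈ l, x ∈ s) → PySem.Set.update s l = s := by
  induction l with
  | nil => intro s _; exact PySem.Set.update_nil s
  | cons x l ih =>
    intro s h
    have hx : x ∈ s := h x (List.mem_cons_self ..)
    have h0 : PySem.Set.update s (x :: l) = PySem.Set.update (PySem.Set.add s x) l := rfl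
    rw [h0, PySem.Set.add_of_mem hx]
    exact ih s (fun y hy => h y (List.mem_cons_of_mem _ hy))

theorem pvSet_update_update {α : Type} [BEq α] [LawfulBEq α] (s : PySem.Set α) (l : List α) :
    PySem.Set.update (PySem.Set.update s l) l = PySem.Set.update s l := by
  exact pvSet_update_of_subset l _ (fun x hx => (PySem.Set.mem_update s l x).2 (Or.inr hx))

theorem pvSet_update_add {α : Type} [BEq α] [LawfulBEq α] (s t : PySem.Set α) (a : α) :
    PySem.Set.update s (t.add a) = (PySem.Set.update s t).add a := by
  by_cases hmem : a ∈ t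
  · rw [PySem.Set.add_of_mem hmem,
      PySem.Set.add_of_mem ((PySem.Set.mem_update s t a).2 (Or.inr hmem))]
  · have hadd : PySem.Set.add t a = t ++ [a] := by
      simp [PySem.Set.add, PySem.Set.contains, hmem]
    rw [hadd, PySem.Set.update_append]
    rfl

theorem pvSet_update_foldl_add {α : Type} [BEq α] [LawfulBEq α] (l : List α) :
    ∀ (t : PySem.Set α) (s : PySem.Set α),
      PySem.Set.update s (l.foldl PySem.Set.add t) = PySem.Set.update (PySem.Set.update s t) l := by
  induction l with
  | nil => intro t s; simp [PySem.Set.update_nil]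
  | cons a l ih =>
    intro t s
    have h0 : List.foldl PySem.Set.add t (a :: l) = List.foldl PySem.Set.add (PySem.Set.add t a) l := rfl
    rw [h0, ih, pvSet_update_add]
    rfl

theorem pvSet_update_ofList {α : Type} [BEq α] [LawfulBEq α] (s : PySem.Set α) (l : List α) :
    PySem.Set.update s (PySem.Set.ofList l) = PySem.Set.update s l := by
  rw [PySem.Set.ofList_eq_foldl, pvSet_update_foldl_add, PySem.Set.update_nil]

theorem pvSet_filter_add {α : Type} [BEq α] [LawfulBEq α] (s : PySem.Set α) (x : α) (p : α → Bool) :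
    (PySem.Set.add s x).filter p = if p x then PySem.Set.add (s.filter p) x else s.filter p := by
  by_cases hx : x ∈ s
  · rw [PySem.Set.add_of_mem hx]
    by_cases hp : p x
    · have : x ∈ s.filter p := List.mem_filter.2 ⟨hx, hp⟩
      rw [if_pos hp, PySem.Set.add_of_mem this]
    · rw [if_neg hp]
  · have hadd : PySem.Set.add s x = s ++ [x] := by
      simp [PySem.Set.add, PySem.Set.contains, hx]
    rw [hadd, List.filter_append]
    by_cases hp : p x
    · have hx' : x ∉ s.filter p := fun h => hx (List.mem_filter.1 h).1
      have hadd' : PySem.Set.add (s.filter p) x = s.filter p ++ [x] := by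
        simp [PySem.Set.add, PySem.Set.contains, hx']
      rw [if_pos hp, hadd']
      simp [hp]
    · rw [if_neg hp]
      simp [hp]

theorem pvSet_filter_foldl_add {α : Type} [BEq α] [LawfulBEq α] (p : α → Bool) (l : List α) :
    ∀ s : PySem.Set α, (l.foldl PySem.Set.add s).filter p = (l.filter p).foldl PySem.Set.add (s.filter p) := by
  induction l with
  | nil => intro s; rfl
  | cons x l ih =>
    intro s
    have h0 : List.foldl PySem.Set.add s (x :: l) = List.foldl PySem.Set.add (PySem.Set.add s x) l := rfl
    rw [h0, ih, pvSet_filter_add, List.filter_cons]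
    by_cases hp : p x
    · rw [if_pos hp, if_pos hp]
      rfl
    · rw [if_neg hp, if_neg hp]

theorem pvSet_ofList_filter {α : Type} [BEq α] [LawfulBEq α] (p : α → Bool) (l : List α) :
    PySem.Set.ofList (l.filter p) = (PySem.Set.ofList l).filter p := by
  rw [PySem.Set.ofList_eq_foldl, PySem.Set.ofList_eq_foldl, pvSet_filter_foldl_add]
  rfl

-- ---- generic Dict fold lemma: getD through a self-referential insert fold ----
theorem pvGetD_foldl_selfinsert {κ ν : Type} [BEq κ] [LawfulBEq κ]
    (F : κ → ν → ν) (dflt : ν) (a : κ) (l : List κ) :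
    ∀ d : PySem.Dict κ ν,
      (l.foldl (fun d x => d.insert x (F x (d.getD x dflt))) d).getD a dflt
        = (F a)^[l.count a] (d.getD a dflt) := by
  induction l with
  | nil => intro d; simp
  | cons x l ih =>
    intro d
    have h0 : List.foldl (fun d x => d.insert x (F x (d.getD x dflt))) d (x :: l)
        = List.foldl (fun d x => d.insert x (F x (d.getD x dflt)))
            (d.insert x (F x (d.getD x dflt))) l := rfl
    rw [h0, ih]
    by_cases hxa : x = a
    · subst hxa
      rw [PySem.Dict.getD_insert_self, List.count_cons_self, Function.iterate_succ_apply]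
    · rw [PySem.Dict.getD_insert_of_ne _ _ _ (Ne.symm hxa), List.count_cons_of_ne hxa]

-- ---- characterisation of A's inner loop ----
theorem pvInnerA_eq_filter (w : List String) (a : String) (v : pvSD) :
    pvInnerA w a v
      = (w.filter (fun x => decide (a ≠ x))).foldl (fun v b => v.insert b (v.getD b 0 + 1)) v := by
  exact PySem.List.foldl_ite_eq_foldl_filter (fun b => a ≠ b) _ w v

theorem pvInnerA_getD (w : List String) (a : String) (v : pvSD) (b : String) :
    (pvInnerA w a v).getD b 0 = v.getD b 0 + ((w.filter (fun x => decide (a ≠ x))).count b : Int) := by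
  rw [pvInnerA_eq_filter]
  exact PySem.Dict.getD_foldl_insert_add_one _ _ _

theorem pvInnerA_keys (w : List String) (a : String) (v : pvSD) :
    (pvInnerA w a v).keys = PySem.Set.update v.keys (w.filter (fun x => decide (a ≠ x))) := by
  rw [pvInnerA_eq_filter]
  exact PySem.Dict.keys_foldl_insert _ (fun d x => d.getD x 0 + 1) v

theorem pvIterA_getD (w : List String) (a : String) (b : String) (k : ℕ) :
    ∀ v : pvSD, ((pvInnerA w a)^[k] v).getD b 0
      = v.getD b 0 + (k : Int) * ((w.filter (fun x => decide (a ≠ x))).count b : Int) := by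
  induction k with
  | zero => intro v; simp
  | succ n ih =>
    intro v
    rw [Function.iterate_succ_apply', pvInnerA_getD, ih]
    push_cast
    ring

theorem pvIterA_keys (w : List String) (a : String) (k : ℕ) (hk : 1 ≤ k) (v : pvSD) :
    ((pvInnerA w a)^[k] v).keys = PySem.Set.update v.keys (w.filter (fun x => decide (a ≠ x))) := by
  obtain ⟨n, rfl⟩ : ∃ n, k = n + 1 := ⟨k - 1, by omega⟩
  clear hk
  induction n with
  | zero => rw [Function.iterate_one, pvInnerA_keys]
  | succ n ih =>
    rw [Function.iterate_succ_apply', pvInnerA_keys,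
      show (pvInnerA w a)^[n + 1] v = (pvInnerA w a)^[n + 1] v from rfl, ih,
      pvSet_update_update]

theorem pvIterA_nodup (w : List String) (a : String) (k : ℕ) (v : pvSD) (hv : v.keys.Nodup) :
    ((pvInnerA w a)^[k] v).keys.Nodup := by
  induction k with
  | zero => exact hv
  | succ n ih =>
    rw [Function.iterate_succ_apply', pvInnerA_eq_filter]
    exact PySem.Dict.nodup_keys_foldl_insert _ _ _ ih

-- ---- characterisation of B's inner loop ----
theorem pvInnerB_eq_filter (w : List String) (a : String) (v : pvSD) :
    pvInnerB w a v
      = (PySem.Set.ofList (w.filter (fun x => decide (a ≠ x)))).foldl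
          (fun v b => v.insert b (v.getD b 0 + (w.count a : Int) * (w.count b : Int))) v := by
  unfold pvInnerB
  rw [PySem.List.foldl_ite_eq_foldl_filter (fun b => a ≠ b), pvSet_ofList_filter]

theorem pvInnerB_getD (w : List String) (a : String) (v : pvSD) (b : String) :
    (pvInnerB w a v).getD b 0
      = v.getD b 0 + (if b ∈ w.filter (fun x => decide (a ≠ x))
          then (w.count a : Int) * (w.count b : Int) else 0) := by
  rw [pvInnerB_eq_filter,
    pvGetD_foldl_selfinsert (fun x t => t + (w.count a : Int) * (w.count x : Int)) 0 b _ v]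
  by_cases hb : b ∈ w.filter (fun x => decide (a ≠ x))
  · have hb' : b ∈ PySem.Set.ofList (w.filter (fun x => decide (a ≠ x))) :=
      (PySem.Set.mem_ofList _ _).2 hb
    rw [List.count_eq_one_of_mem (PySem.Set.nodup_ofList _) hb', if_pos hb]
    simp
  · have hb' : b ∉ PySem.Set.ofList (w.filter (fun x => decide (a ≠ x))) :=
      fun h => hb ((PySem.Set.mem_ofList _ _).1 h)
    rw [List.count_eq_zero_of_not_mem hb', if_neg hb]
    simp

theorem pvInnerB_keys (w : List String) (a : String) (v : pvSD) :
    (pvInnerB w a v).keys = PySem.Set.update v.keys (w.filter (fun x => decide (a ≠ x))) := by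
  rw [pvInnerB_eq_filter,
    PySem.Dict.keys_foldl_insert _ (fun d x => d.getD x 0 + (w.count a : Int) * (w.count x : Int)) v,
    pvSet_update_ofList]

theorem pvInnerB_nodup (w : List String) (a : String) (v : pvSD) (hv : v.keys.Nodup) :
    (pvInnerB w a v).keys.Nodup := by
  rw [pvInnerB_eq_filter]
  exact PySem.Dict.nodup_keys_foldl_insert _ _ _ hv

-- ---- the inner dicts agree ----
theorem pvInner_eq (w : List String) (a : String) (v : pvSD) (hv : v.keys.Nodup)
    (ha : a ∈ w) : (pvInnerA w a)^[w.count a] v = pvInnerB w a v := by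
  have hk : 1 ≤ w.count a := List.count_pos_iff.2 ha
  apply PySem.Dict.ext
  rw [PySem.Dict.items_eq_map_keys _ (pvIterA_nodup w a _ v hv) (0 : Int),
    PySem.Dict.items_eq_map_keys _ (pvInnerB_nodup w a v hv) (0 : Int),
    pvIterA_keys w a _ hk v, pvInnerB_keys w a v]
  apply List.map_congr_left
  intro b _
  refine Prod.ext rfl ?_
  show ((pvInnerA w a)^[w.count a] v).getD b 0 = (pvInnerB w a v).getD b 0
  rw [pvIterA_getD w a b _ v, pvInnerB_getD w a v b]
  by_cases hb : b ∈ w.filter (fun x => decide (a ≠ x))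
  · have hab : decide (a ≠ b) = true := (List.mem_filter.1 hb).2
    rw [if_pos hb, List.count_filter (p := fun x => decide (a ≠ x)) (l := w) hab]
  · have h0 : (w.filter (fun x => decide (a ≠ x))).count b = 0 :=
      List.count_eq_zero_of_not_mem hb
    rw [if_neg hb, h0]
    simp

-- ---- one word: A's step equals B's step ----
theorem pvStep_eq (m : pvMD) (hI : pvI m) (w : List String) : pvStepA m w = pvStepB m w := by
  have ndA : (pvStepA m w).keys.Nodup := by
    unfold pvStepA
    exact PySem.Dict.nodup_keys_foldl_insert _ _ _ hI.1
  have ndB : (pvStepB m w).keys.Nodup := by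
    unfold pvStepB
    exact PySem.Dict.nodup_keys_foldl_insert _ _ _ hI.1
  apply PySem.Dict.ext
  rw [PySem.Dict.items_eq_map_keys _ ndA PySem.Dict.empty,
    PySem.Dict.items_eq_map_keys _ ndB PySem.Dict.empty]
  have hkA : (pvStepA m w).keys = PySem.Set.update m.keys w := by
    unfold pvStepA
    exact PySem.Dict.keys_foldl_insert _ (fun m a => pvInnerA w a (m.getD a PySem.Dict.empty)) m
  have hkB : (pvStepB m w).keys = PySem.Set.update m.keys w := by
    unfold pvStepB
    rw [PySem.Dict.keys_foldl_insert _ (fun m a => pvInnerB w a (m.getD a PySem.Dict.empty)) m,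
      pvSet_update_ofList]
  rw [hkA, hkB]
  apply List.map_congr_left
  intro a _
  refine Prod.ext rfl ?_
  show (pvStepA m w).getD a PySem.Dict.empty = (pvStepB m w).getD a PySem.Dict.empty
  unfold pvStepA pvStepB
  rw [pvGetD_foldl_selfinsert (fun a v => pvInnerA w a v) PySem.Dict.empty a w m,
    pvGetD_foldl_selfinsert (fun a v => pvInnerB w a v) PySem.Dict.empty a (PySem.Set.ofList w) m]
  by_cases ha : a ∈ w
  · have h1 : (PySem.Set.ofList w).count a = 1 :=
      List.count_eq_one_of_mem (PySem.Set.nodup_ofList _) ((PySem.Set.mem_ofList _ _).2 ha)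
    rw [h1, Function.iterate_one]
    exact pvInner_eq w a _ (hI.2 a) ha
  · have h0 : w.count a = 0 := List.count_eq_zero_of_not_mem ha
    have h0' : (PySem.Set.ofList w).count a = 0 :=
      List.count_eq_zero_of_not_mem (fun h => ha ((PySem.Set.mem_ofList _ _).1 h))
    rw [h0, h0']
    rfl

theorem pvI_step (m : pvMD) (hI : pvI m) (w : List String) : pvI (pvStepA m w) := by
  constructor
  · unfold pvStepA
    exact PySem.Dict.nodup_keys_foldl_insert _ _ _ hI.1
  · intro a
    unfold pvStepA
    rw [pvGetD_foldl_selfinsert (fun a v => pvInnerA w a v) PySem.Dict.empty a w m]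
    exact pvIterA_nodup w a _ _ (hI.2 a)

-- ---- phase 1 over all words ----
theorem pvRun_eq (words : List String) :
    ∀ m : pvMD, pvI m →
      (words.foldl (fun m w => pvStepA m (pvLetters w)) m
        = words.foldl (fun m w => pvStepB m (pvLetters w)) m)
      ∧ pvI (words.foldl (fun m w => pvStepA m (pvLetters w)) m) := by
  induction words with
  | nil => intro m hI; exact ⟨rfl, hI⟩
  | cons w ws ih =>
    intro m hI
    have hstep := pvI_step m hI (pvLetters w)
    refine ⟨?_, (ih _ hstep).2⟩
    show ws.foldl _ (pvStepA m (pvLetters w)) = ws.foldl _ (pvStepB m (pvLetters w))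
    rw [← pvStep_eq m hI (pvLetters w)]
    exact (ih _ hstep).1

-- ---- the ports in terms of pvStepA / pvStepB ----
theorem pvPortA_eq (words : List String) :
    findCoAppear words =
      (let mapping := words.foldl (fun m w => pvStepA m (pvLetters w)) PySem.Dict.empty
       (mapping.items.foldl (fun finalRes p =>
          finalRes.insert p.1
            (p.2.items.foldl (fun res q =>
              if q.2 == (PySem.List.max? p.2.values (fun v => v)).getD 0 then res ++ [q.1] else res) []))
          PySem.Dict.empty).items) := by
  have h1 : (fun (mapping : pvMD) (word : String) =>
      word.toList.foldl (fun mapping c1 =>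
        mapping.insert (String.ofList [c1])
          (word.toList.foldl (fun counts c2 =>
            if String.ofList [c1] ≠ String.ofList [c2] then
              counts.insert (String.ofList [c2]) (counts.getD (String.ofList [c2]) 0 + 1)
            else counts)
            (mapping.getD (String.ofList [c1]) PySem.Dict.empty))) mapping)
      = fun (m : pvMD) (w : String) => pvStepA m (pvLetters w) := by
    funext m w
    simp only [pvStepA, pvInnerA, pvLetters, List.foldl_map]
  simp only [findCoAppear]
  rw [h1]

theorem pvPortB_eq (words : List String) :
    findCoAppear_alt words =
      (let mapping := words.foldl (fun m w => pvStepB m (pvLetters w)) PySem.Dict.empty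
       mapping.items.map (fun p =>
         (p.1, (p.2.items.filter
                 (fun q => q.2 == (PySem.List.max? p.2.values (fun v => v)).getD 0)).map (·.1)))) := by
  have hfreq : ∀ word : String,
      (word.toList.foldl (fun f c =>
        f.insert (String.ofList [c]) (f.getD (String.ofList [c]) 0 + 1)) PySem.Dict.empty)
      = PySem.Dict.counter (pvLetters word) := by
    intro word
    rw [← PySem.Dict.foldl_insert_getD_add_one_eq_counter, pvLetters, List.foldl_map]
  have h1 : (fun (mapping : pvMD) (word : String) =>
      ((word.toList.foldl (fun f c =>
          f.insert (String.ofList [c]) (f.getD (String.ofList [c]) 0 + 1)) PySem.Dict.empty).items.foldl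
        (fun mapping p =>
          mapping.insert p.1
            ((word.toList.foldl (fun f c =>
                f.insert (String.ofList [c]) (f.getD (String.ofList [c]) 0 + 1)) PySem.Dict.empty).items.foldl
              (fun counts q =>
                if p.1 ≠ q.1 then counts.insert q.1 (counts.getD q.1 0 + p.2 * q.2) else counts)
              (mapping.getD p.1 PySem.Dict.empty))) mapping))
      = fun (m : pvMD) (w : String) => pvStepB m (pvLetters w) := by
    funext m w
    rw [hfreq w]
    simp only [pvStepB, pvInnerB, PySem.Dict.items_counter, List.foldl_map]
  simp only [findCoAppear_alt]
  rw [h1]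

-- ---- phase 2 ----
theorem pvFinal_eq (M : pvMD) (h : M.keys.Nodup) :
    (M.items.foldl (fun finalRes p =>
        finalRes.insert p.1
          (p.2.items.foldl (fun res q =>
            if q.2 == (PySem.List.max? p.2.values (fun v => v)).getD 0 then res ++ [q.1] else res) []))
        PySem.Dict.empty).items
    = M.items.map (fun p =>
        (p.1, (p.2.items.filter
                (fun q => q.2 == (PySem.List.max? p.2.values (fun v => v)).getD 0)).map (·.1))) := by
  rw [PySem.Dict.items_foldl_insert_fresh M.items (fun p => p.1)
    (fun p => p.2.items.foldl (fun res q =>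
      if q.2 == (PySem.List.max? p.2.values (fun v => v)).getD 0 then res ++ [q.1] else res) [])
    PySem.Dict.empty
    (fun p _ => PySem.Dict.contains_empty p.1)
    (by simpa only [PySem.Dict.keys] using h)]
  have hempty : (PySem.Dict.empty : PySem.Dict String (List String)).items = [] := rfl
  rw [hempty, List.nil_append]
  apply List.map_congr_left
  intro p _
  rw [PySem.List.foldl_append_if
    (fun q => q.2 == (PySem.List.max? p.2.values (fun v => v)).getD 0) (fun q => q.1) p.2.items []]
  rfl

theorem pvEq (words : List String) : findCoAppear words = findCoAppear_alt words := by
  have hI0 : pvI PySem.Dict.empty := by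
    refine ⟨PySem.Dict.nodup_keys_empty, fun a => ?_⟩
    rw [PySem.Dict.getD_empty]
    exact PySem.Dict.nodup_keys_empty
  have hrun := pvRun_eq words PySem.Dict.empty hI0
  rw [pvPortA_eq, pvPortB_eq]
  show (((words.foldl (fun m w => pvStepA m (pvLetters w)) PySem.Dict.empty).items.foldl _ PySem.Dict.empty).items) = _
  rw [pvFinal_eq _ hrun.2.1, hrun.1]

-- ===== VERDICT (by name: the statement is the Claim_ definition above) =====
theorem findCoAppear_spec : Claim_equal_findCoAppear := by
  intro words _ _
  unfold Spec_findCoAppear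
  exact pvEq words
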